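-- pv_equiv track=rewrite | github.com/2024-coding-test-study/2024-2 | week01/좋은 단어/선지원.py | solution
-- ===== SOURCE A (Python) =====
-- def solution(N, word):
--   stack = []
--   for w in word:
--     stack.append(w)
--     if len(stack) >= 2:
--       #stack에 연속된 두 값이 같으면 pop
--       if stack[-1] == stack[-2]:
--         stack.pop()
--         stack.pop()
--   return 1 if len(stack) == 0 else 0
-- ===== SOURCE B (Python) =====
-- def solution(N, word):
--     s = list(word)
--     changed = True
--     while changed:
--         changed = False
--         for i in range(len(s) - 1):
--             if s[i] == s[i + 1]:
--                 del s[i:i + 2]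
--                 changed = True
--                 break
--     return 1 if not s else 0
-- ===== Notes on version B (the rewrite author's own statement) =====
-- stated objective: alternative
-- what changed: Replaced the single-pass stack cancellation with a repeat-until-fixpoint loop that each round removes the first adjacent equal pair from the word; relies on confluence of pair cancellation.
import Mathlib
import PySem

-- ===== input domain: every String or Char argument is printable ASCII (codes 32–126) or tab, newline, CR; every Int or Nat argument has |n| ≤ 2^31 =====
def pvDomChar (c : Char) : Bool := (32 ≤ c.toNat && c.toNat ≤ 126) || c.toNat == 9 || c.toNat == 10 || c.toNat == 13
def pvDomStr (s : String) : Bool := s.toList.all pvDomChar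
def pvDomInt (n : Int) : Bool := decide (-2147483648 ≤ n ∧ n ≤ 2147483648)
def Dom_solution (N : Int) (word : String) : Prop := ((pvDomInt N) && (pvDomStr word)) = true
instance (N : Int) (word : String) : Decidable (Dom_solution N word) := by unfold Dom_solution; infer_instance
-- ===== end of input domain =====

-- B replaces A's single-pass stack cancellation by a repeat-until-fixpoint loop that each
-- round deletes the first adjacent equal pair (objective: alternative decomposition).

-- ===== PORT A =====
-- literal port of A: stack list, append, stack[-1]==stack[-2] via pyGet?, two pops from the
-- end (each stack.pop() removes the last element = dropLast; exact here since length ≥ 2).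
def solution (N : Int) (word : String) : Int :=
  let stack := word.toList.foldl (fun stack w =>
    let stack := stack ++ [w]
    if stack.length ≥ 2 then
      if PySem.List.pyGet? stack (-1) = PySem.List.pyGet? stack (-2) then
        stack.dropLast.dropLast
      else stack
    else stack) ([] : List Char)
  if stack.length = 0 then 1 else 0

-- ===== PORT B =====
-- pvScan = Source B's inner for-loop: find the first i with s[i]=s[i+1] and delete both,
-- returning none when no adjacent equal pair exists (then the while-loop stops).
def pvScan : List Char → Option (List Char)
  | a :: b :: rest => if a = b then some rest else (pvScan (b :: rest)).map (a :: ·)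
  | _ => none

theorem pvScan_length {l l' : List Char} (h : pvScan l = some l') : l'.length + 2 = l.length := by
  induction l generalizing l' with
  | nil => simp [pvScan] at h
  | cons a t ih =>
    match t with
    | [] => simp [pvScan] at h
    | b :: rest =>
      simp only [pvScan] at h
      split at h
      · cases h; simp
      · rcases Option.map_eq_some_iff.mp h with ⟨m, hm, rfl⟩
        have := ih hm; simp only [List.length_cons] at this ⊢; omega

-- pvReduce = Source B's outer while-loop: repeat pvScan until it fails.
def pvReduce (l : List Char) : List Char :=
  match h : pvScan l with
  | some l' => pvReduce l'
  | none => l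
termination_by l.length
decreasing_by have := pvScan_length h; omega

def solution_alt (N : Int) (word : String) : Int :=
  if pvReduce word.toList = [] then 1 else 0

-- ===== PRECONDITION & SPEC =====
def Spec_solution (N : Int) (word : String) (out : Int) : Prop := out = solution_alt N word
instance (N : Int) (word : String) (out : Int) : Decidable (Spec_solution N word out) := by unfold Spec_solution; infer_instance

-- ===== CLAIM (what is proved, stated in full; the proofs are below) =====
def Claim_equal_solution : Prop := ∀ (N : Int) (word : String), Dom_solution N word → Spec_solution N word (solution N word)

-- ===== LEMMAS AND PROOFS =====

-- clean form of A's loop body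
def pvStep (st : List Char) (c : Char) : List Char :=
  if st.getLast? = some c then st.dropLast else st ++ [c]

theorem pvStep_eq (st : List Char) (c : Char) :
    (let s := st ++ [c]
     if s.length ≥ 2 then
       if PySem.List.pyGet? s (-1) = PySem.List.pyGet? s (-2) then s.dropLast.dropLast
       else s
     else s) = pvStep st c := by
  rcases List.eq_nil_or_concat st with rfl | ⟨s, a, rfl⟩
  · simp [pvStep]
  · simp only [List.concat_eq_append]
    show (if (s ++ [a] ++ [c]).length ≥ 2 then
        if PySem.List.pyGet? (s ++ [a] ++ [c]) (-1) = PySem.List.pyGet? (s ++ [a] ++ [c]) (-2)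
        then (s ++ [a] ++ [c]).dropLast.dropLast else s ++ [a] ++ [c]
      else s ++ [a] ++ [c]) = pvStep (s ++ [a]) c
    rw [List.append_assoc]
    simp only [List.singleton_append]
    have h1 : PySem.List.pyGet? (s ++ [a, c]) (-1) = some c := by
      rw [PySem.List.pyGet?_neg_one]; simp
    have h2 : PySem.List.pyGet? (s ++ [a, c]) (-2) = some a := by
      rw [PySem.List.pyGet?_neg_ofNat _ 2 (by omega) (by simp)]
      simp
    rw [if_pos (by simp), h1, h2]
    have hl : (s ++ [a]).getLast? = some a := by simp
    by_cases hca : c = a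
    · subst hca
      have e : s ++ [c, c] = (s ++ [c]) ++ [c] := by simp
      rw [if_pos rfl, e, List.dropLast_concat, List.dropLast_concat]
      simp [pvStep, hl]
    · rw [if_neg (by simpa using hca)]
      have : ¬ ((s ++ [a]).getLast? = some c) := by rw [hl]; simpa using fun h => hca h.symm
      simp [pvStep, this]
      exact fun h => hca h.symm

def pvNe : List Char → Prop := List.IsChain (· ≠ ·)

theorem pvStep_chain {st : List Char} (c : Char) (h : pvNe st) : pvNe (pvStep st c) := by
  unfold pvStep
  split
  · rename_i hg
    rw [← List.dropLast_append_getLast? _ hg] at h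
    exact h.left_of_append
  · rename_i hne
    rw [pvNe, List.isChain_append]
    refine ⟨h, List.isChain_singleton _, ?_⟩
    intro x hx y hy
    simp at hy; subst hy
    intro hxy; subst hxy
    exact hne hx

theorem pvStep_step {st : List Char} (a : Char) (h : pvNe st) :
    pvStep (pvStep st a) a = st := by
  by_cases hl : st.getLast? = some a
  · have hdec := List.dropLast_append_getLast? _ hl
    have hs : ¬ (st.dropLast.getLast? = some a) := by
      intro hc
      rw [← hdec] at h
      have := (List.isChain_append.mp h).2.2 a hc a (by simp)
      exact this rfl
    simp only [pvStep]
    rw [if_pos hl, if_neg hs]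
    exact hdec
  · simp [pvStep, hl, List.getLast?_concat, List.dropLast_concat]

theorem pvFoldl_scan_none :
    ∀ (l st : List Char), pvScan l = none →
      (∀ x ∈ st.getLast?, ∀ y ∈ l.head?, x ≠ y) →
      l.foldl pvStep st = st ++ l := by
  intro l
  induction l with
  | nil => intro st _ _; simp
  | cons c rest ih =>
    intro st hscan hsep
    have hstep : pvStep st c = st ++ [c] := by
      unfold pvStep
      split
      · exact absurd rfl (hsep c (by assumption) c (by simp))
      · rfl
    match rest with
    | [] => simp [hstep]
    | d :: r =>
      simp only [pvScan] at hscan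
      split at hscan
      · exact absurd hscan (by simp)
      · rename_i hcd
        have hs : pvScan (d :: r) = none := by
          cases hm : pvScan (d :: r) with
          | none => rfl
          | some m => rw [hm] at hscan; simp at hscan
        have := ih (st ++ [c]) hs (by
          intro x hx y hy
          simp at hx
          simp at hy
          subst hx; subst hy; exact hcd)
        simp only [List.foldl_cons, hstep, this, List.append_assoc]
        rfl

theorem pvFoldl_scan_some :
    ∀ (l : List Char), ∀ {l' st : List Char}, pvNe st → pvScan l = some l' →
      l.foldl pvStep st = l'.foldl pvStep st := by
  intro l
  induction l with
  | nil => intro l' st _ h; simp [pvScan] at h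
  | cons a t ih =>
    intro l' st hst hscan
    match t with
    | [] => simp [pvScan] at hscan
    | b :: rest =>
      simp only [pvScan] at hscan
      split at hscan
      · rename_i hab; subst hab
        cases hscan
        simp only [List.foldl_cons, pvStep_step a hst]
      · rcases Option.map_eq_some_iff.mp hscan with ⟨m, hm, rfl⟩
        simp only [List.foldl_cons]
        exact ih (pvStep_chain a hst) hm

theorem pvReduce_scan_none (l : List Char) : pvScan (pvReduce l) = none := by
  rw [pvReduce]
  split
  · rename_i l' h
    exact pvReduce_scan_none l'
  · assumption
termination_by l.length
decreasing_by rename_i heq; have := pvScan_length heq; omega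

theorem pvFoldl_eq_reduce (l : List Char) : l.foldl pvStep [] = pvReduce l := by
  rw [pvReduce]
  split
  · rename_i l' h
    have hlen := pvScan_length h
    rw [pvFoldl_scan_some l (List.isChain_nil) h]
    exact pvFoldl_eq_reduce l'
  · rename_i h
    simpa using pvFoldl_scan_none l [] h (by simp)
termination_by l.length
decreasing_by rename_i heq; have := pvScan_length heq; omega

-- ===== VERDICT (by name: the statement is the Claim_ definition above) =====
theorem solution_spec : Claim_equal_solution := by
  intro N word _
  unfold Spec_solution solution solution_alt
  have hfun : (fun (stack : List Char) (w : Char) =>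
      let stack := stack ++ [w]
      if stack.length ≥ 2 then
        if PySem.List.pyGet? stack (-1) = PySem.List.pyGet? stack (-2) then
          stack.dropLast.dropLast
        else stack
      else stack) = pvStep := by
    funext st c
    exact pvStep_eq st c
  rw [hfun, pvFoldl_eq_reduce]
  simp [List.length_eq_zero_iff]
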